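-- pv_equiv track=rewrite | github.com/Fenomorff/AoC | AdventOfCode25/printing_department.py | part_2
-- ===== SOURCE A (Python) =====
-- def part_2(rows):
--     """solution of part 2
--
--     Args:
--         rows (list): list of rows
--
--     Returns:
--         int: answer
--     """
--     answer = 0
--     counter = 0
--     cycle_answer = 1
--     while cycle_answer:
--         cycle_answer = 0
--         for row in range(0, len(rows)):
--             for item in range(0, len(rows[row])):
--                 if rows[row][item] == '@':
--                     ## top
--                     if row:
--                         if rows[row - 1][item] == '@':
--                             counter += 1
--                         ## topleft
--                         if item:
--                             if rows[row - 1][item - 1] == '@':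
--                                 counter += 1
--                         ## topright
--                         if item != len(rows[row]) - 1:
--                             if rows[row - 1][item + 1] == '@':
--                                 counter += 1
--                     ## left
--                     if item:
--                         if rows[row][item - 1] == '@':
--                             counter += 1
--                     ## right
--                     if item != len(rows[row]) - 1:
--                         if rows[row][item +1] == '@':
--                             counter += 1
--                     ## bottom
--                     if row != len(rows) - 1:
--                         if rows[row + 1][item] == '@':
--                             counter += 1
--                         ## bottomleft
--                         if item:
--                             if rows[row + 1][item - 1] == '@':
--                                 counter += 1
--                         ## bottomright
--                         if item != len(rows[row]) - 1:
--                             if rows[row + 1][item + 1] == '@':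
--                                 counter += 1
--                     if counter < 4:
--                         cycle_answer += 1
--                         rows[row][item] = '.'
--                     counter = 0
--         answer += cycle_answer
--     return answer
-- ===== SOURCE B (Python) =====
-- OFFS = ((-1, -1), (-1, 0), (-1, 1), (0, -1), (0, 1), (1, -1), (1, 0), (1, 1))
--
--
-- def part_2(rows):
--     """Count the '@' cells that cascade away: repeatedly, any '@' cell with
--     fewer than 4 '@' neighbours (8-neighbourhood) is removed.  Computed with a
--     worklist: a cell is re-examined only when a neighbour of it is removed.
--     (Does not mutate rows.)"""
--     live = {(r, c) for r, row in enumerate(rows)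
--             for c, x in enumerate(row) if x == '@'}
--
--     def deg(r, c):
--         return sum(1 for dr, dc in OFFS if (r + dr, c + dc) in live)
--
--     queue = [v for v in sorted(live) if deg(*v) < 4]
--     removed = 0
--     i = 0
--     while i < len(queue):
--         r, c = v = queue[i]
--         i += 1
--         if v in live and deg(r, c) < 4:
--             live.remove(v)
--             removed += 1
--             for dr, dc in OFFS:
--                 w = (r + dr, c + dc)
--                 if w in live:
--                     queue.append(w)
--     return removed
-- ===== Notes on version B (the rewrite author's own statement) =====
-- stated objective: alternative
-- what changed: A repeatedly re-sweeps the whole grid until a sweep removes nothing; B computes the same removal count with a one-shot worklist cascade (bootstrap percolation) over a set of live cells: seed the queue with under-connected '@' cells and re-examine a cell only when one of its neighbours is removed; Pre_ excludes exactly the inputs on which A raises IndexError (an '@' cell whose guarded neighbour access hits a shorter adjacent row); B also does not mutate rows.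
import Mathlib
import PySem

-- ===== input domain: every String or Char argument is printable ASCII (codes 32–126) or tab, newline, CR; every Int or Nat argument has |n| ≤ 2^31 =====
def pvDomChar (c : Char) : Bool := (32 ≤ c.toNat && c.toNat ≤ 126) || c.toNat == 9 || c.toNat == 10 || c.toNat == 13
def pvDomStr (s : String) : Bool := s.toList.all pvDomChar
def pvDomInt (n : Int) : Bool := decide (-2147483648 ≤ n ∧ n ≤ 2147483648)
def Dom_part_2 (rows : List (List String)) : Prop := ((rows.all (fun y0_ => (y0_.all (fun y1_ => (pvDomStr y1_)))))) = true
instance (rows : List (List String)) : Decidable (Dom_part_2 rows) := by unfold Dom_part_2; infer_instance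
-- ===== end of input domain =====

-- B replaces A's repeated full-grid sweeps by a one-shot worklist (bootstrap-percolation) cascade
-- over a set of live cells; equivalence is about the RETURN value only: Python A mutates `rows`
-- in place ('@' → '.'), B does not.

-- ===== PORT A =====
-- rows[r][c] as read by A; indices are Nats here because every index A uses is nonnegative
-- (row-1 / item-1 occur only under `if row:` / `if item:`).  An out-of-range access (where
-- Python raises IndexError, excluded by Pre_) yields "" here.
def cellA (g : List (List String)) (r c : Nat) : String := (g.getD r []).getD c ""

-- the `counter` accumulated for one '@' cell: the eight guarded neighbour tests, in A's order
def nbrCountA (g : List (List String)) (r c : Nat) : Nat :=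
  let w := (g.getD r []).length
  (if r ≠ 0 then
      (if cellA g (r-1) c = "@" then 1 else 0)
    + (if c ≠ 0 then (if cellA g (r-1) (c-1) = "@" then 1 else 0) else 0)
    + (if c ≠ w - 1 then (if cellA g (r-1) (c+1) = "@" then 1 else 0) else 0)
   else 0)
  + (if c ≠ 0 then (if cellA g r (c-1) = "@" then 1 else 0) else 0)
  + (if c ≠ w - 1 then (if cellA g r (c+1) = "@" then 1 else 0) else 0)
  + (if r ≠ g.length - 1 then
      (if cellA g (r+1) c = "@" then 1 else 0)
    + (if c ≠ 0 then (if cellA g (r+1) (c-1) = "@" then 1 else 0) else 0)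
    + (if c ≠ w - 1 then (if cellA g (r+1) (c+1) = "@" then 1 else 0) else 0)
   else 0)

-- rows[r][c] = v  (in-range whenever executed by A)
def setCellA (g : List (List String)) (r c : Nat) (v : String) : List (List String) :=
  g.set r ((g.getD r []).set c v)

-- the body of A's inner loop for one (row, item) pair; state = (rows, cycle_answer)
def stepA (s : List (List String) × Nat) (r c : Nat) : List (List String) × Nat :=
  if cellA s.1 r c = "@" then
    if nbrCountA s.1 r c < 4 then (setCellA s.1 r c ".", s.2 + 1) else s
  else s

-- one iteration of A's while loop: the two nested for-loops
def passA (g : List (List String)) : List (List String) × Nat :=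
  (List.range g.length).foldl
    (fun s r => (List.range ((s.1.getD r []).length)).foldl (fun s2 c => stepA s2 r c) s)
    (g, 0)

-- total number of '@' cells: the termination measure of A's while loop
def countAt (g : List (List String)) : Nat := (g.map (fun row => row.count "@")).sum

theorem countA_count_set_row (row : List String) (c : Nat)
    (h : row.getD c "" = "@") : (row.set c ".").count "@" + 1 = row.count "@" := by
  induction row generalizing c with
  | nil => simp [List.getD] at h
  | cons x t ih =>
    cases c with
    | zero =>
      simp [List.getD] at h
      subst h
      simp [List.count_cons]
    | succ c =>
      have := ih c (by simpa [List.getD] using h)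
      simp only [List.set]
      simp [List.count_cons]
      omega

theorem countA_setCell (g : List (List String)) (r c : Nat)
    (h : cellA g r c = "@") : countAt (setCellA g r c ".") + 1 = countAt g := by
  induction g generalizing r with
  | nil => simp [cellA, List.getD] at h
  | cons row t ih =>
    cases r with
    | zero =>
      have := countA_count_set_row row c (by simpa [cellA, List.getD] using h)
      simp [setCellA, countAt, List.getD]
      omega
    | succ r =>
      have := ih r (by simpa [cellA, List.getD] using h)
      simp only [setCellA, List.getD, List.getElem?_cons_succ, List.set] at *
      simp [countAt] at *
      omega

theorem countA_stepA (s : List (List String) × Nat) (r c : Nat) :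
    countAt (stepA s r c).1 + (stepA s r c).2 = countAt s.1 + s.2 := by
  unfold stepA
  split_ifs with h1 h2
  · have := countA_setCell s.1 r c h1
    simp; omega
  · rfl
  · rfl

theorem countA_foldl {α : Type} (f : (List (List String) × Nat) → α → (List (List String) × Nat))
    (hf : ∀ s a, countAt (f s a).1 + (f s a).2 = countAt s.1 + s.2)
    (l : List α) (s : List (List String) × Nat) :
    countAt (l.foldl f s).1 + (l.foldl f s).2 = countAt s.1 + s.2 := by
  induction l generalizing s with
  | nil => rfl
  | cons a t ih => rw [List.foldl_cons, ih, hf]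

theorem countA_passA (g : List (List String)) :
    countAt (passA g).1 + (passA g).2 = countAt g := by
  unfold passA
  have := countA_foldl
    (fun s r => (List.range ((s.1.getD r []).length)).foldl (fun s2 c => stepA s2 r c) s)
    (fun s r => countA_foldl _ (fun s2 c => countA_stepA s2 r c) _ s)
    (List.range g.length) (g, 0)
  simpa using this

theorem countA_passA_lt {g : List (List String)} (h : (passA g).2 ≠ 0) :
    countAt (passA g).1 < countAt g := by
  have := countA_passA g; omega

-- A's while loop, accumulating `answer`
def loopA (g : List (List String)) (answer : Nat) : Nat :=
  let p := passA g
  if _h : p.2 = 0 then answer + p.2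
  else loopA p.1 (answer + p.2)
termination_by countAt g
decreasing_by exact countA_passA_lt _h

def part_2 (rows : List (List String)) : Int := (loopA rows 0 : Int)

-- ===== PORT B =====
-- the eight (dr, dc) offsets of Source B, in order
def offsB : List (Int × Int) := [(-1,-1),(-1,0),(-1,1),(0,-1),(0,1),(1,-1),(1,0),(1,1)]

-- live = {(r, c) | rows[r][c] == '@'}  (Source B's set comprehension over enumerate)
def liveB (g : List (List String)) : PySem.Set (Int × Int) :=
  (PySem.List.enumerate g).foldl
    (fun s rp =>
      (PySem.List.enumerate rp.2).foldl
        (fun s2 cp => if cp.2 = "@" then PySem.Set.add s2 (rp.1, cp.1) else s2) s)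
    PySem.Set.empty

-- deg(r, c): number of live neighbours
def degB (live : PySem.Set (Int × Int)) (r c : Int) : Int :=
  offsB.foldl (fun n d => if (r + d.1, c + d.2) ∈ live then n + 1 else n) 0

-- the cells Source B appends to the queue after removing (r, c): its live neighbours, in OFFS order
def appendB (live : PySem.Set (Int × Int)) (r c : Int) : List (Int × Int) :=
  offsB.foldl
    (fun acc d => if (r + d.1, c + d.2) ∈ live then acc ++ [(r + d.1, c + d.2)] else acc)
    []

-- Source B's while loop over the growing queue (index pointer = recursion on the front)
def loopB (live : PySem.Set (Int × Int)) (queue : List (Int × Int)) (removed : Int) : Int :=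
  match queue with
  | [] => removed
  | v :: q =>
    if h : v ∈ live ∧ degB live v.1 v.2 < 4 then
      let live' := PySem.Set.discard live v
      loopB live' (q ++ appendB live' v.1 v.2) (removed + 1)
    else loopB live q removed
termination_by (live.length, queue.length)
decreasing_by
  · refine Prod.Lex.left _ _ ?_
    have : ∃ x ∈ live, ¬ (!x == v) = true := ⟨v, h.1, by simp⟩
    simpa [PySem.Set.discard] using List.length_filter_lt_length_iff_exists.mpr this
  · exact Prod.Lex.right _ (by simp)

def part_2_alt (rows : List (List String)) : Int :=
  let live := liveB rows
  let queue := (PySem.List.sorted2 live (fun v => v.1) (fun v => v.2)).filter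
    (fun v => degB live v.1 v.2 < 4)
  loopB live queue 0

-- ===== PRECONDITION & SPEC =====
-- the in-range requirement A's eight guarded accesses place on one '@' cell (r, c)
def okCellA (rows : List (List String)) (r c : Nat) : Prop :=
  (1 ≤ r → c < (rows.getD (r-1) []).length ∧
     (c+1 < (rows.getD r []).length → c+1 < (rows.getD (r-1) []).length))
  ∧ (r+1 < rows.length → c < (rows.getD (r+1) []).length ∧
     (c+1 < (rows.getD r []).length → c+1 < (rows.getD (r+1) []).length))

-- Pre_ excludes exactly the inputs on which Python A raises IndexError: a grid containing an
-- '@' whose guarded neighbour access hits a shorter adjacent row.  A returns on every input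
-- satisfying Pre_ (every '@' cell is scanned with all eight accesses during the first sweep).
def Pre_part_2 (rows : List (List String)) : Prop :=
  ∀ r ∈ List.range rows.length, ∀ c ∈ List.range ((rows.getD r []).length),
    (rows.getD r []).getD c "" = "@" → okCellA rows r c
instance (rows : List (List String)) : Decidable (Pre_part_2 rows) := by
  unfold Pre_part_2 okCellA; infer_instance

def pvWitness_part_2 : List (List String) := [["@", "@"], ["@", "@"]]

def Spec_part_2 (rows : List (List String)) (out : Int) : Prop := out = part_2_alt rows
instance (rows : List (List String)) (out : Int) : Decidable (Spec_part_2 rows out) := by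
  unfold Spec_part_2; infer_instance

-- ===== CLAIM (what is proved, stated in full; the proofs are below) =====
def Claim_equal_part_2 : Prop :=
  ∀ (rows : List (List String)), Dom_part_2 rows → Pre_part_2 rows →
    Spec_part_2 rows (part_2 rows)

-- ===== LEMMAS AND PROOFS =====

/- ## Generic fold shapes -/

theorem pvFoldlIfCount {α : Type} (P : α → Prop) [DecidablePred P] (L : List α) (z : Int) :
    L.foldl (fun n d => if P d then n + 1 else n) z = z + (L.countP (fun d => decide (P d)) : Int) := by
  induction L generalizing z with
  | nil => simp
  | cons a t ih =>
    by_cases h : P a <;> simp [List.countP_cons, h, ih] <;> omega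

theorem pvCountPExists {α : Type} {p q : α → Bool} {l : List α}
    (h : l.countP q < l.countP p) : ∃ x ∈ l, p x ∧ ¬ q x := by
  by_contra hc
  push_neg at hc
  exact absurd (List.countP_mono_left (by simpa using hc)) (by omega)

theorem pvNodupSubsetLen {α : Type} [DecidableEq α] {F S : List α}
    (hF : F.Nodup) (hsub : F ⊆ S) : F.length ≤ S.length := by
  calc F.length = F.toFinset.card := (List.toFinset_card_of_nodup hF).symm
    _ ≤ S.toFinset.card := Finset.card_le_card (by intro x hx; simp at hx ⊢; exact hsub hx)
    _ ≤ S.length := List.toFinset_card_le S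

theorem pvNodupLenEq {α : Type} [DecidableEq α] {F F' : List α}
    (h1 : F.Nodup) (h2 : F'.Nodup) (s1 : F ⊆ F') (s2 : F' ⊆ F) : F.length = F'.length :=
  le_antisymm (pvNodupSubsetLen h1 s1) (pvNodupSubsetLen h2 s2)

theorem pvLenDiscard {live : PySem.Set (Int × Int)} {v : Int × Int}
    (hnd : live.Nodup) (hv : v ∈ live) :
    (PySem.Set.discard live v).length + 1 = live.length := by
  have hpred : (fun (y : Int × Int) => !(y == v)) = (fun y => decide (¬(y == v) = true)) := by
    funext y; by_cases h : y = v <;> simp [h]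
  have h1 : (PySem.Set.discard live v).length
      = live.countP (fun y => decide (¬(y == v) = true)) := by
    show (List.filter (fun y => !(y == v)) live).length = _
    rw [hpred, List.countP_eq_length_filter]
  have h2 : live.countP (fun y => y == v) = 1 := by
    have := List.count_eq_one_of_mem hnd hv
    simpa [List.count] using this
  have h3 := List.length_eq_countP_add_countP (l := live) (p := fun y => y == v)
  omega

/- ## The abstract removal process (shared by both ports, phrased with B's degree) -/

theorem degB_eq_countP (live : PySem.Set (Int × Int)) (r c : Int) :
    degB live r c = (offsB.countP (fun d => decide ((r + d.1, c + d.2) ∈ live)) : Int) := by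
  have h := pvFoldlIfCount (fun d : Int × Int => (r + d.1, c + d.2) ∈ live) offsB 0
  unfold degB
  rw [h]
  simp

theorem degB_mono {live live' : PySem.Set (Int × Int)}
    (h : ∀ x, x ∈ live → x ∈ live') (r c : Int) : degB live r c ≤ degB live' r c := by
  rw [degB_eq_countP, degB_eq_countP]
  have := List.countP_mono_left (l := offsB)
    (p := fun d => decide ((r + d.1, c + d.2) ∈ live))
    (q := fun d => decide ((r + d.1, c + d.2) ∈ live'))
    (by intro d _ hd
        simp only [decide_eq_true_eq] at hd ⊢
        exact h _ hd)
  omega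

def closedB (S : PySem.Set (Int × Int)) : Prop := ∀ p ∈ S, ¬ degB S p.1 p.2 < 4

inductive ReachB : PySem.Set (Int × Int) → PySem.Set (Int × Int) → Prop
  | refl (S : PySem.Set (Int × Int)) : ReachB S S
  | step {S T : PySem.Set (Int × Int)} (p : Int × Int) (hmem : p ∈ S)
      (hdeg : degB S p.1 p.2 < 4) (h : ReachB (PySem.Set.discard S p) T) : ReachB S T

theorem ReachB_subset {S T : PySem.Set (Int × Int)} (h : ReachB S T) : T ⊆ S := by
  induction h with
  | refl => exact fun x hx => hx
  | step p hmem hdeg h ih =>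
    intro x hx
    exact ((PySem.Set.mem_discard _ _ _).mp (ih hx)).1

theorem ReachB_nodup {S T : PySem.Set (Int × Int)} (h : ReachB S T) (hS : S.Nodup) :
    T.Nodup := by
  induction h with
  | refl => exact hS
  | step p hmem hdeg h ih => exact ih (PySem.Set.nodup_discard _ _ hS)

-- CONFLUENCE: a closed subset survives any sequence of valid removals
theorem closedB_sub_of_reach {S F T : PySem.Set (Int × Int)}
    (hreach : ReachB S F) (hT : closedB T) (hTS : T ⊆ S) : T ⊆ F := by
  induction hreach with
  | refl => exact hTS
  | step p hmem hdeg h ih =>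
    refine ih (fun x hx => ?_)
    have hxp : x ≠ p := by
      rintro rfl
      have := degB_mono (live := T) (live' := _) (fun y hy => hTS hy) x.1 x.2
      exact hT x hx (by omega)
    exact (PySem.Set.mem_discard _ _ _).mpr ⟨hTS hx, hxp⟩

theorem pvFinalLenEq {S F F' : PySem.Set (Int × Int)} (hS : S.Nodup)
    (h1 : ReachB S F) (c1 : closedB F) (h2 : ReachB S F') (c2 : closedB F') :
    F.length = F'.length :=
  pvNodupLenEq (ReachB_nodup h1 hS) (ReachB_nodup h2 hS)
    (closedB_sub_of_reach h2 c1 (ReachB_subset h1))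
    (closedB_sub_of_reach h1 c2 (ReachB_subset h2))

/- ## Properties of liveB -/

theorem pvNodupAdd {α : Type} [BEq α] [LawfulBEq α] {s : PySem.Set α} (h : s.Nodup) (x : α) :
    (PySem.Set.add s x).Nodup := by
  unfold PySem.Set.add
  split
  · exact h
  · next hc =>
      refine List.Nodup.append h (List.nodup_singleton x) ?_
      simpa [List.disjoint_singleton] using fun hx => hc (by simpa using hx)

theorem pvNodupFoldl {α St : Type} (step : St → α → St) (N : St → Prop)
    (h : ∀ s a, N s → N (step s a)) (l : List α) (s : St) (hs : N s) : N (l.foldl step s) := by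
  induction l generalizing s with
  | nil => exact hs
  | cons a t ih => exact ih _ (h s a hs)

theorem liveB_nodup (g : List (List String)) : (liveB g).Nodup := by
  unfold liveB
  refine pvNodupFoldl _ List.Nodup (fun s rp hs => ?_) _ _ (by simp [PySem.Set.empty])
  refine pvNodupFoldl _ List.Nodup (fun s2 cp hs2 => ?_) _ _ hs
  dsimp only
  split
  · exact pvNodupAdd hs2 _
  · exact hs2

theorem pvMemFoldlAddIf {α γ : Type} [BEq γ] [LawfulBEq γ] (P : α → Prop) [DecidablePred P]
    (f : α → γ) (L : List α) (s0 : PySem.Set γ) (x : γ) :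
    (x ∈ L.foldl (fun s a => if P a then PySem.Set.add s (f a) else s) s0
      ↔ x ∈ s0 ∨ ∃ a ∈ L, P a ∧ x = f a) := by
  induction L generalizing s0 with
  | nil => simp
  | cons a t ih =>
    rw [List.foldl_cons, ih]
    by_cases h : P a
    · simp only [h, if_pos, PySem.Set.mem_add]
      constructor
      · rintro (⟨hx | hx⟩ | ⟨b, hb, hPb, hx⟩)
        · exact Or.inl hx
        · exact Or.inr ⟨a, by simp, h, hx⟩
        · exact Or.inr ⟨b, by simp [hb], hPb, hx⟩
      · rintro (hx | ⟨b, hb, hPb, hx⟩)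
        · exact Or.inl (Or.inl hx)
        · rcases List.mem_cons.mp hb with rfl | hb
          · exact Or.inl (Or.inr hx)
          · exact Or.inr ⟨b, hb, hPb, hx⟩
    · simp only [h, if_neg, not_false_iff]
      constructor
      · rintro (hx | ⟨b, hb, hPb, hx⟩)
        · exact Or.inl hx
        · exact Or.inr ⟨b, by simp [hb], hPb, hx⟩
      · rintro (hx | ⟨b, hb, hPb, hx⟩)
        · exact Or.inl hx
        · rcases List.mem_cons.mp hb with rfl | hb
          · exact absurd hPb h
          · exact Or.inr ⟨b, hb, hPb, hx⟩

theorem pvMemFoldlNested {α β γ : Type} [BEq γ] [LawfulBEq γ]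
    (M : α → List β) (P : β → Prop) [DecidablePred P] (f : α → β → γ)
    (L : List α) (s0 : PySem.Set γ) (x : γ) :
    (x ∈ L.foldl
        (fun s a => (M a).foldl (fun s2 b => if P b then PySem.Set.add s2 (f a b) else s2) s) s0
      ↔ x ∈ s0 ∨ ∃ a ∈ L, ∃ b ∈ M a, P b ∧ x = f a b) := by
  induction L generalizing s0 with
  | nil => simp
  | cons a t ih =>
    rw [List.foldl_cons, ih, pvMemFoldlAddIf]
    constructor
    · rintro (⟨hx | ⟨b, hb, hPb, hx⟩⟩ | ⟨a', ha', b, hb, hPb, hx⟩)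
      · exact Or.inl hx
      · exact Or.inr ⟨a, by simp, b, hb, hPb, hx⟩
      · exact Or.inr ⟨a', by simp [ha'], b, hb, hPb, hx⟩
    · rintro (hx | ⟨a', ha', b, hb, hPb, hx⟩)
      · exact Or.inl (Or.inl hx)
      · rcases List.mem_cons.mp ha' with rfl | ha'
        · exact Or.inl (Or.inr ⟨b, hb, hPb, hx⟩)
        · exact Or.inr ⟨a', ha', b, hb, hPb, hx⟩

theorem mem_liveB (g : List (List String)) (p : Int × Int) :
    p ∈ liveB g ↔ ∃ r c : Nat, r < g.length ∧ c < (g.getD r []).length ∧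
      (g.getD r []).getD c "" = "@" ∧ p = ((r : Int), (c : Int)) := by
  unfold liveB
  rw [pvMemFoldlNested (fun rp : Int × List String => PySem.List.enumerate rp.2)
    (fun cp : Int × String => cp.2 = "@") (fun rp cp => (rp.1, cp.1))]
  simp only [PySem.List.mem_enumerate_iff, PySem.Set.empty]
  constructor
  · rintro (h | ⟨rp, ⟨r, hr, rfl⟩, cp, ⟨c, hc, rfl⟩, hat, rfl⟩)
    · simp at h
    · dsimp only at hc hat
      refine ⟨r, c, hr, ?_, ?_, by simp⟩
      · rwa [List.getD_eq_getElem _ _ hr]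
      · rw [List.getD_eq_getElem _ _ hr, List.getD_eq_getElem _ _ hc]
        exact hat
  · rintro ⟨r, c, hr, hc, hat, rfl⟩
    rw [List.getD_eq_getElem _ _ hr] at hc
    rw [List.getD_eq_getElem _ _ hr] at hat
    rw [List.getD_eq_getElem _ _ hc] at hat
    exact Or.inr ⟨(0 + (r : Int), g[r]), ⟨r, hr, rfl⟩, (0 + (c : Int), g[r][c]),
      ⟨c, hc, rfl⟩, hat, by simp⟩

/- ## The A-side bridge -/

def sameShapeA (g gc : List (List String)) : Prop :=
  gc.length = g.length ∧ ∀ r : Nat, (gc.getD r []).length = (g.getD r []).length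

def RelA (gc : List (List String)) (S : PySem.Set (Int × Int)) : Prop :=
  ∀ r c : Nat, (cellA gc r c = "@" ↔ ((r : Int), (c : Int)) ∈ S)

-- the invariant tying A's mutated grid gc to the abstract live set S; S stays inside the
-- initial live set of g, so Pre_ (okCellA of every initial '@') applies to every member
def InvA (g gc : List (List String)) (S : PySem.Set (Int × Int)) : Prop :=
  RelA gc S ∧ S.Nodup ∧ sameShapeA g gc ∧ (∀ p ∈ S, p ∈ liveB g)

theorem cellA_at_range {gc : List (List String)} {r c : Nat} (h : cellA gc r c = "@") :
    r < gc.length ∧ c < (gc.getD r []).length := by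
  unfold cellA at h
  by_cases hr : r < gc.length
  · by_cases hcc : c < (gc.getD r []).length
    · exact ⟨hr, hcc⟩
    · rw [List.getD_eq_default _ _ (by omega)] at h; simp at h
  · rw [show gc.getD r [] = [] from List.getD_eq_default _ _ (by omega)] at h
    simp [List.getD] at h

theorem okCell_of_live {g : List (List String)} (hPre : Pre_part_2 g)
    {r c : Nat} (h : (((r : Int), (c : Int)) : Int × Int) ∈ liveB g) : okCellA g r c := by
  obtain ⟨r', c', hr', hc', hat, heq⟩ := (mem_liveB g _).mp h
  rw [Prod.mk.injEq] at heq
  obtain ⟨h1, h2⟩ : r = r' ∧ c = c' := by omega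
  subst h1; subst h2
  exact hPre r (List.mem_range.mpr hr') c (List.mem_range.mpr hc') hat

-- the eight guarded tests of A count exactly the live neighbours counted by degB
theorem nbrCountA_bridge {g gc : List (List String)} {S : PySem.Set (Int × Int)}
    (hPre : Pre_part_2 g) (hInv : InvA g gc S) (r c : Nat)
    (hr : r < g.length) (hc : c < (g.getD r []).length) :
    (nbrCountA gc r c : Int) = degB S (r : Int) (c : Int) := by
  obtain ⟨hRel, hnd, hshape, hsub⟩ := hInv
  have hglen : gc.length = g.length := hshape.1
  have hw : (gc.getD r []).length = (g.getD r []).length := hshape.2 r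
  set w := (g.getD r []).length with hwdef
  have pmem : ∀ (a b : Int) (r' c' : Nat), a = (r' : Int) → b = (c' : Int) →
      (((a, b) : Int × Int) ∈ S ↔ cellA gc r' c' = "@") := by
    rintro a b r' c' rfl rfl; exact (hRel r' c').symm
  have hnp : ∀ p ∈ S, ∃ r' c' : Nat, p = ((r' : Int), (c' : Int)) := by
    intro p hp
    obtain ⟨r', c', _, _, _, hpe⟩ := (mem_liveB g p).mp (hsub p hp)
    exact ⟨r', c', hpe⟩
  -- members of S, as cells of gc, are in range of gc (hence of g)
  have hrange : ∀ r' c' : Nat, (((r' : Int), (c' : Int)) : Int × Int) ∈ S →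
      r' < g.length ∧ c' < (g.getD r' []).length := by
    intro r' c' hm
    obtain ⟨h1, h2⟩ := cellA_at_range ((pmem _ _ r' c' rfl rfl).mp hm)
    exact ⟨by omega, by rw [← hshape.2 r']; exact h2⟩
  -- okCellA of a member of S (it is an initial '@' of g)
  have hok : ∀ r' c' : Nat, (((r' : Int), (c' : Int)) : Int × Int) ∈ S → okCellA g r' c' :=
    fun r' c' hm => okCell_of_live hPre (hsub _ hm)
  -- flatten A's nested guards
  have flat2 : ∀ (P R : Prop) [Decidable P] [Decidable R],
      (if P then (if R then (1:Nat) else 0) else 0) = if P ∧ R then 1 else 0 := by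
    intro P R _ _; split_ifs <;> simp_all
  have dist3 : ∀ (P : Prop) [Decidable P] (x y z : Nat),
      (if P then (x + y + z) else 0)
        = (if P then x else 0) + (if P then y else 0) + (if P then z else 0) := by
    intro P _ x y z; split_ifs <;> simp
  have hsplit : (nbrCountA gc r c : Int)
      = (if r ≠ 0 ∧ cellA gc (r-1) c = "@" then 1 else 0)
      + (if r ≠ 0 ∧ c ≠ 0 ∧ cellA gc (r-1) (c-1) = "@" then 1 else 0)
      + (if r ≠ 0 ∧ c ≠ w - 1 ∧ cellA gc (r-1) (c+1) = "@" then 1 else 0)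
      + (if c ≠ 0 ∧ cellA gc r (c-1) = "@" then 1 else 0)
      + (if c ≠ w - 1 ∧ cellA gc r (c+1) = "@" then 1 else 0)
      + (if r ≠ g.length - 1 ∧ cellA gc (r+1) c = "@" then 1 else 0)
      + (if r ≠ g.length - 1 ∧ c ≠ 0 ∧ cellA gc (r+1) (c-1) = "@" then 1 else 0)
      + (if r ≠ g.length - 1 ∧ c ≠ w - 1 ∧ cellA gc (r+1) (c+1) = "@" then 1 else 0) := by
    have hnat : nbrCountA gc r c
        = (if r ≠ 0 ∧ cellA gc (r-1) c = "@" then 1 else 0)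
        + (if r ≠ 0 ∧ c ≠ 0 ∧ cellA gc (r-1) (c-1) = "@" then 1 else 0)
        + (if r ≠ 0 ∧ c ≠ w - 1 ∧ cellA gc (r-1) (c+1) = "@" then 1 else 0)
        + (if c ≠ 0 ∧ cellA gc r (c-1) = "@" then 1 else 0)
        + (if c ≠ w - 1 ∧ cellA gc r (c+1) = "@" then 1 else 0)
        + (if r ≠ g.length - 1 ∧ cellA gc (r+1) c = "@" then 1 else 0)
        + (if r ≠ g.length - 1 ∧ c ≠ 0 ∧ cellA gc (r+1) (c-1) = "@" then 1 else 0)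
        + (if r ≠ g.length - 1 ∧ c ≠ w - 1 ∧ cellA gc (r+1) (c+1) = "@" then 1 else 0) := by
      simp only [nbrCountA]
      rw [hw, hglen]
      simp only [dist3, flat2]
      ring
    rw [hnat]
    push_cast
    ring
  -- the '@' at (r, c±1) in row r itself bounds c against w (used for the skipped-corner cases)
  have hrowlen : ∀ c' : Nat, (((r : Int), (c' : Int)) : Int × Int) ∈ S → c' < w := by
    intro c' hm
    exact (hrange r c' hm).2
  rw [hsplit, degB_eq_countP]
  simp only [offsB, List.countP_cons, List.countP_nil, decide_eq_true_eq]
  push_cast [apply_ite (fun n : Nat => (n : Int))]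
  have e11 : (((r : Int) + -1, (c : Int) + -1) ∈ S)
      ↔ (r ≠ 0 ∧ c ≠ 0 ∧ cellA gc (r-1) (c-1) = "@") := by
    constructor
    · intro hm
      obtain ⟨r', c', hpe⟩ := hnp _ hm
      rw [Prod.mk.injEq] at hpe
      have hr0 : r ≠ 0 := by omega
      have hc0 : c ≠ 0 := by omega
      refine ⟨hr0, hc0, (pmem _ _ (r-1) (c-1) (by push_cast; omega) (by push_cast; omega)).mp hm⟩
    · rintro ⟨h1, h2, h3⟩
      exact (pmem _ _ (r-1) (c-1) (by push_cast; omega) (by push_cast; omega)).mpr h3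
  have e10 : (((r : Int) + -1, (c : Int) + 0) ∈ S)
      ↔ (r ≠ 0 ∧ cellA gc (r-1) c = "@") := by
    constructor
    · intro hm
      obtain ⟨r', c', hpe⟩ := hnp _ hm
      rw [Prod.mk.injEq] at hpe
      have hr0 : r ≠ 0 := by omega
      exact ⟨hr0, (pmem _ _ (r-1) c (by push_cast; omega) (by omega)).mp hm⟩
    · rintro ⟨h1, h3⟩
      exact (pmem _ _ (r-1) c (by push_cast; omega) (by omega)).mpr h3
  have e12 : (((r : Int) + -1, (c : Int) + 1) ∈ S)
      ↔ (r ≠ 0 ∧ c ≠ w - 1 ∧ cellA gc (r-1) (c+1) = "@") := by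
    constructor
    · intro hm
      obtain ⟨r', c', hpe⟩ := hnp _ hm
      rw [Prod.mk.injEq] at hpe
      have hr0 : r ≠ 0 := by omega
      have hm' : (((r-1 : Nat) : Int), ((c+1 : Nat) : Int)) ∈ S := by
        have : ((r-1 : Nat) : Int) = (r : Int) + -1 ∧ ((c+1 : Nat) : Int) = (c : Int) + 1 := by
          constructor <;> push_cast <;> omega
        rw [this.1, this.2]; exact hm
      -- the '@' at (r-1, c+1) is an initial '@' of g; its row-below clause bounds c+1 by w
      have hokn := hok (r-1) (c+1) hm'
      have hlt : c + 1 < w := by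
        have h2 := hokn.2
        have hrlt : (r-1) + 1 < g.length := by omega
        have := (h2 hrlt).1
        rw [show (r-1)+1 = r by omega] at this
        omega
      exact ⟨hr0, by omega, (pmem _ _ (r-1) (c+1) (by push_cast; omega) (by push_cast; omega)).mp hm⟩
    · rintro ⟨h1, h2, h3⟩
      exact (pmem _ _ (r-1) (c+1) (by push_cast; omega) (by push_cast; omega)).mpr h3
  have e01 : (((r : Int) + 0, (c : Int) + -1) ∈ S)
      ↔ (c ≠ 0 ∧ cellA gc r (c-1) = "@") := by
    constructor
    · intro hm
      obtain ⟨r', c', hpe⟩ := hnp _ hm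
      rw [Prod.mk.injEq] at hpe
      have hc0 : c ≠ 0 := by omega
      exact ⟨hc0, (pmem _ _ r (c-1) (by omega) (by push_cast; omega)).mp hm⟩
    · rintro ⟨h1, h3⟩
      exact (pmem _ _ r (c-1) (by omega) (by push_cast; omega)).mpr h3
  have e21 : (((r : Int) + 0, (c : Int) + 1) ∈ S)
      ↔ (c ≠ w - 1 ∧ cellA gc r (c+1) = "@") := by
    constructor
    · intro hm
      have hm' : (((r : Nat) : Int), ((c+1 : Nat) : Int)) ∈ S := by
        have : ((c+1 : Nat) : Int) = (c : Int) + 1 := by push_cast; omega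
        rw [this]; simpa using hm
      have hlt : c + 1 < w := hrowlen (c+1) hm'
      exact ⟨by omega, (pmem _ _ r (c+1) (by omega) (by push_cast; omega)).mp hm⟩
    · rintro ⟨h1, h3⟩
      exact (pmem _ _ r (c+1) (by omega) (by push_cast; omega)).mpr h3
  have e31 : (((r : Int) + 1, (c : Int) + -1) ∈ S)
      ↔ (r ≠ g.length - 1 ∧ c ≠ 0 ∧ cellA gc (r+1) (c-1) = "@") := by
    constructor
    · intro hm
      obtain ⟨r', c', hpe⟩ := hnp _ hm
      rw [Prod.mk.injEq] at hpe
      have hc0 : c ≠ 0 := by omega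
      have hm' : (((r+1 : Nat) : Int), ((c-1 : Nat) : Int)) ∈ S := by
        have : ((r+1 : Nat) : Int) = (r : Int) + 1 ∧ ((c-1 : Nat) : Int) = (c : Int) + -1 := by
          constructor <;> push_cast <;> omega
        rw [this.1, this.2]; exact hm
      have := (hrange (r+1) (c-1) hm').1
      exact ⟨by omega, hc0, (pmem _ _ (r+1) (c-1) (by push_cast; omega) (by push_cast; omega)).mp hm⟩
    · rintro ⟨h1, h2, h3⟩
      exact (pmem _ _ (r+1) (c-1) (by push_cast; omega) (by push_cast; omega)).mpr h3
  have e30 : (((r : Int) + 1, (c : Int) + 0) ∈ S)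
      ↔ (r ≠ g.length - 1 ∧ cellA gc (r+1) c = "@") := by
    constructor
    · intro hm
      have hm' : (((r+1 : Nat) : Int), ((c : Nat) : Int)) ∈ S := by
        have : ((r+1 : Nat) : Int) = (r : Int) + 1 := by push_cast; omega
        rw [this]; simpa using hm
      have := (hrange (r+1) c hm').1
      exact ⟨by omega, (pmem _ _ (r+1) c (by push_cast; omega) (by omega)).mp hm⟩
    · rintro ⟨h1, h3⟩
      exact (pmem _ _ (r+1) c (by push_cast; omega) (by omega)).mpr h3
  have e32 : (((r : Int) + 1, (c : Int) + 1) ∈ S)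
      ↔ (r ≠ g.length - 1 ∧ c ≠ w - 1 ∧ cellA gc (r+1) (c+1) = "@") := by
    constructor
    · intro hm
      have hm' : (((r+1 : Nat) : Int), ((c+1 : Nat) : Int)) ∈ S := by
        have : ((r+1 : Nat) : Int) = (r : Int) + 1 ∧ ((c+1 : Nat) : Int) = (c : Int) + 1 := by
          constructor <;> push_cast <;> omega
        rw [this.1, this.2]; exact hm
      have hrlt := (hrange (r+1) (c+1) hm').1
      -- the '@' at (r+1, c+1) is an initial '@' of g; its row-above clause bounds c+1 by w
      have hokn := hok (r+1) (c+1) hm'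
      have hlt : c + 1 < w := by
        have := (hokn.1 (by omega)).1
        rw [show (r+1)-1 = r by omega] at this
        omega
      exact ⟨by omega, by omega, (pmem _ _ (r+1) (c+1) (by push_cast; omega) (by push_cast; omega)).mp hm⟩
    · rintro ⟨h1, h2, h3⟩
      exact (pmem _ _ (r+1) (c+1) (by push_cast; omega) (by push_cast; omega)).mpr h3
  simp only [e11, e10, e12, e01, e21, e31, e30, e32]
  ring

/- ## A's pass = a sequence of abstract removals -/

theorem pvCycFoldMono {α St : Type} (proj : St → Nat) (step : St → α → St)
    (h : ∀ s a, proj s ≤ proj (step s a)) (l : List α) (s : St) :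
    proj s ≤ proj (l.foldl step s) := by
  induction l generalizing s with
  | nil => exact le_refl _
  | cons a t ih => exact le_trans (h s a) (ih _)

theorem pvCycFoldEq {α St : Type} (proj : St → Nat) (step : St → α → St)
    (hmono : ∀ s a, proj s ≤ proj (step s a))
    (h : ∀ s a, step s a = s ∨ proj s < proj (step s a)) (l : List α) (s : St)
    (heq : proj (l.foldl step s) = proj s) : l.foldl step s = s := by
  induction l generalizing s with
  | nil => rfl
  | cons a t ih =>
    rcases h s a with h1 | h1
    · rw [List.foldl_cons, h1] at heq ⊢; exact ih s heq
    · exfalso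
      have := pvCycFoldMono proj step hmono t (step s a)
      rw [List.foldl_cons] at heq
      omega

def innerA (r : Nat) (cs : List Nat) (s : List (List String) × Nat) :
    List (List String) × Nat :=
  cs.foldl (fun s2 c => stepA s2 r c) s

theorem ReachB_trans {S T U : PySem.Set (Int × Int)}
    (h1 : ReachB S T) (h2 : ReachB T U) : ReachB S U := by
  induction h1 with
  | refl => exact h2
  | step p hmem hdeg h ih => exact ReachB.step p hmem hdeg (ih h2)

theorem stepA_cyc_mono (s : List (List String) × Nat) (r c : Nat) :
    s.2 ≤ (stepA s r c).2 := by
  unfold stepA; split_ifs <;> simp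

theorem stepA_disj (s : List (List String) × Nat) (r c : Nat) :
    stepA s r c = s ∨ s.2 < (stepA s r c).2 := by
  unfold stepA; split_ifs <;> simp

theorem pvGetDSet {A : Type} (l : List A) (i j : Nat) (x : A) (d : A) (hi : i < l.length) :
    (l.set i x).getD j d = if i = j then x else l.getD j d := by
  by_cases hij : i = j
  · subst hij
    simp [List.getD_eq_getElem?_getD, List.getElem?_set, hi]
  · simp [List.getD_eq_getElem?_getD, List.getElem?_set, hij]

theorem cellA_setCell {gc : List (List String)} {r c : Nat}
    (hr : r < gc.length) (hc : c < (gc.getD r []).length) (v : String) (r' c' : Nat) :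
    cellA (setCellA gc r c v) r' c'
      = if r' = r ∧ c' = c then v else cellA gc r' c' := by
  unfold cellA setCellA
  rw [pvGetDSet gc r r' _ [] hr]
  by_cases hrr : r = r'
  · subst hrr
    rw [if_pos rfl, pvGetDSet _ c c' v "" hc]
    by_cases hcc : c = c'
    · subst hcc; rw [if_pos rfl, if_pos ⟨rfl, rfl⟩]
    · rw [if_neg hcc, if_neg (by tauto)]
  · rw [if_neg hrr, if_neg (by tauto)]

theorem InvA_remove {g gc : List (List String)} {S : PySem.Set (Int × Int)}
    (hInv : InvA g gc S) {r c : Nat} (hcell : cellA gc r c = "@") :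
    InvA g (setCellA gc r c ".") (PySem.Set.discard S ((r : Int), (c : Int))) := by
  obtain ⟨hRel, hnd, hshape, hsub⟩ := hInv
  obtain ⟨hr, hc⟩ := cellA_at_range hcell
  refine ⟨?_, PySem.Set.nodup_discard _ _ hnd, ?_, ?_⟩
  · intro r' c'
    rw [cellA_setCell hr hc "." r' c', PySem.Set.mem_discard]
    by_cases hrc : r' = r ∧ c' = c
    · obtain ⟨rfl, rfl⟩ := hrc
      simp
    · rw [if_neg hrc, hRel r' c']
      have : (((r' : Int), (c' : Int)) : Int × Int) ≠ ((r : Int), (c : Int)) := by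
        rw [Ne, Prod.mk.injEq]
        omega
      tauto
  · refine ⟨by simpa [setCellA] using hshape.1, fun r' => ?_⟩
    have := hshape.2 r'
    unfold setCellA
    rw [pvGetDSet gc r r' _ [] hr]
    by_cases hrr : r = r'
    · subst hrr
      rw [if_pos rfl]
      simpa using this
    · rw [if_neg hrr]
      exact this
  · intro p hp
    exact hsub p ((PySem.Set.mem_discard _ _ _).mp hp).1

theorem innerA_spec (g : List (List String)) (hPre : Pre_part_2 g) (r : Nat)
    (hr : r < g.length)
    (cs : List Nat) (hcs : ∀ c ∈ cs, c < (g.getD r []).length)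
    (s : List (List String) × Nat) (S : PySem.Set (Int × Int)) (hInv : InvA g s.1 S) :
    ∃ S', InvA g (innerA r cs s).1 S' ∧ ReachB S S' ∧
      (innerA r cs s).2 + S'.length = s.2 + S.length ∧
      ((innerA r cs s).2 = 0 → s.2 = 0 ∧ S' = S ∧
        ∀ c ∈ cs, cellA s.1 r c = "@" → ¬ degB S (r : Int) (c : Int) < 4) := by
  induction cs generalizing s S with
  | nil =>
    exact ⟨S, hInv, ReachB.refl S, rfl, fun hz => ⟨hz, rfl, by simp⟩⟩
  | cons c cs ih =>
    have hcol : c < (g.getD r []).length := hcs c (by simp)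
    have hrest : ∀ c' ∈ cs, c' < (g.getD r []).length := fun c' hc' => hcs c' (by simp [hc'])
    have hstepfold : innerA r (c :: cs) s = innerA r cs (stepA s r c) := rfl
    by_cases hcell : cellA s.1 r c = "@"
    · have hb := nbrCountA_bridge hPre hInv r c hr hcol
      by_cases hdeg : nbrCountA s.1 r c < 4
      · -- A removes (r, c): one abstract Step
        have hstep : stepA s r c = (setCellA s.1 r c ".", s.2 + 1) := by
          simp [stepA, hcell, hdeg]
        have hInv' : InvA g (stepA s r c).1 (PySem.Set.discard S ((r : Int), (c : Int))) := by
          rw [hstep]; exact InvA_remove hInv hcell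
        obtain ⟨S', h1, h2, h3, _⟩ := ih hrest (stepA s r c) _ hInv'
        have hmem : (((r : Int), (c : Int)) : Int × Int) ∈ S := (hInv.1 r c).mp hcell
        have hdegS : degB S (r : Int) (c : Int) < 4 := by omega
        have hlen := pvLenDiscard hInv.2.1 hmem
        have hmono : s.2 + 1 ≤ (innerA r cs (setCellA s.1 r c ".", s.2 + 1)).2 := by
          have := pvCycFoldMono (fun st : List (List String) × Nat => st.2)
            (fun s2 c' => stepA s2 r c') (fun s2 c' => stepA_cyc_mono s2 r c') cs
            (setCellA s.1 r c ".", s.2 + 1)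
          simpa [innerA] using this
        refine ⟨S', h1, ReachB.step _ hmem hdegS h2, ?_, fun h0 => ?_⟩
        · rw [hstepfold, hstep]
          rw [hstep] at h3
          have h3' : (innerA r cs (setCellA s.1 r c ".", s.2 + 1)).2 + S'.length
              = s.2 + 1 + (PySem.Set.discard S ((r : Int), (c : Int))).length := by
            simpa [innerA] using h3
          unfold innerA at h3' ⊢
          omega
        · exfalso
          rw [hstepfold, hstep] at h0
          unfold innerA at h0 hmono
          omega
      · have hstep : stepA s r c = s := by simp [stepA, hcell, hdeg]
        rw [hstepfold, hstep]
        obtain ⟨S', h1, h2, h3, h4⟩ := ih hrest s S hInv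
        refine ⟨S', h1, h2, h3, fun h0 => ?_⟩
        obtain ⟨hz, hSS, hall⟩ := h4 h0
        refine ⟨hz, hSS, fun c' hc' hcell' => ?_⟩
        rcases List.mem_cons.mp hc' with rfl | hc'
        · omega
        · exact hall c' hc' hcell'
    · have hstep : stepA s r c = s := by simp [stepA, hcell]
      rw [hstepfold, hstep]
      obtain ⟨S', h1, h2, h3, h4⟩ := ih hrest s S hInv
      refine ⟨S', h1, h2, h3, fun h0 => ?_⟩
      obtain ⟨hz, hSS, hall⟩ := h4 h0
      refine ⟨hz, hSS, fun c' hc' hcell' => ?_⟩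
      rcases List.mem_cons.mp hc' with rfl | hc'
      · exact absurd hcell' hcell
      · exact hall c' hc' hcell'

theorem innerA_cyc_mono (r : Nat) (cs : List Nat) (s : List (List String) × Nat) :
    s.2 ≤ (innerA r cs s).2 :=
  pvCycFoldMono (fun st : List (List String) × Nat => st.2)
    (fun s2 c' => stepA s2 r c') (fun s2 c' => stepA_cyc_mono s2 r c') cs s

theorem innerA_eq_of_cyc_eq (r : Nat) (cs : List Nat) (s : List (List String) × Nat)
    (h : (innerA r cs s).2 = s.2) : innerA r cs s = s :=
  pvCycFoldEq (fun st : List (List String) × Nat => st.2)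
    (fun s2 c' => stepA s2 r c') (fun s2 c' => stepA_cyc_mono s2 r c')
    (fun s2 c' => stepA_disj s2 r c') cs s h

theorem outerA_spec (g : List (List String)) (hPre : Pre_part_2 g) (rs : List Nat)
    (hrs : ∀ r ∈ rs, r < g.length) (s : List (List String) × Nat)
    (S : PySem.Set (Int × Int)) (hInv : InvA g s.1 S) :
    ∃ S',
      InvA g (rs.foldl (fun s2 r => innerA r (List.range ((s2.1.getD r []).length)) s2) s).1 S' ∧
      ReachB S S' ∧
      (rs.foldl (fun s2 r => innerA r (List.range ((s2.1.getD r []).length)) s2) s).2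
        + S'.length = s.2 + S.length ∧
      ((rs.foldl (fun s2 r => innerA r (List.range ((s2.1.getD r []).length)) s2) s).2 = 0 →
        s.2 = 0 ∧ S' = S ∧ ∀ r ∈ rs, ∀ c ∈ List.range ((s.1.getD r []).length),
          cellA s.1 r c = "@" → ¬ degB S (r : Int) (c : Int) < 4) := by
  induction rs generalizing s S with
  | nil => exact ⟨S, hInv, ReachB.refl S, rfl, fun hz => ⟨hz, rfl, by simp⟩⟩
  | cons r rs ih =>
    have hr : r < g.length := hrs r (by simp)
    have hrs' : ∀ r' ∈ rs, r' < g.length := fun r' h' => hrs r' (by simp [h'])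
    have hcs : ∀ c ∈ List.range ((s.1.getD r []).length), c < (g.getD r []).length := by
      intro c hcm
      rw [List.mem_range] at hcm
      rw [← hInv.2.2.1.2 r]
      exact hcm
    obtain ⟨S1, i1, i2, i3, i4⟩ := innerA_spec g hPre r hr _ hcs s S hInv
    set t := innerA r (List.range ((s.1.getD r []).length)) s with ht
    obtain ⟨S', j1, j2, j3, j4⟩ := ih hrs' t S1 i1
    rw [List.foldl_cons]
    rw [show innerA r (List.range ((s.1.getD r []).length)) s = t from ht.symm]
    refine ⟨S', j1, ReachB_trans i2 j2, by omega, fun h0 => ?_⟩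
    have hmono := pvCycFoldMono (fun st : List (List String) × Nat => st.2)
      (fun s2 r' => innerA r' (List.range ((s2.1.getD r' []).length)) s2)
      (fun s2 r' => innerA_cyc_mono r' _ s2) rs t
    have h0' : (List.foldl (fun s2 r' => innerA r' (List.range ((s2.1.getD r' []).length)) s2)
        t rs).2 = 0 := h0
    have htc : t.2 = 0 := Nat.le_zero.mp (le_of_le_of_eq hmono h0')
    obtain ⟨hz1, hS1, hall1⟩ := i4 htc
    have hts : t = s := innerA_eq_of_cyc_eq r _ s (by rw [← ht]; omega)
    obtain ⟨_, hS2, hall2⟩ := j4 h0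
    rw [hts] at hall2
    rw [hS1] at hall2
    refine ⟨hz1, by rw [hS2, hS1], fun r' hr' c hc hcell => ?_⟩
    rcases List.mem_cons.mp hr' with rfl | hr'
    · exact hall1 c hc hcell
    · exact hall2 r' hr' c hc hcell

theorem passA_spec (g : List (List String)) (hPre : Pre_part_2 g) (gc : List (List String))
    (S : PySem.Set (Int × Int)) (hInv : InvA g gc S) :
    ∃ S', InvA g (passA gc).1 S' ∧ ReachB S S' ∧
      (passA gc).2 + S'.length = S.length ∧
      ((passA gc).2 = 0 → closedB S) := by
  have hpass : passA gc
      = (List.range gc.length).foldl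
          (fun s2 r => innerA r (List.range ((s2.1.getD r []).length)) s2) (gc, 0) := rfl
  have hlen : gc.length = g.length := hInv.2.2.1.1
  have hrs : ∀ r ∈ List.range gc.length, r < g.length := by
    intro r h
    rw [List.mem_range] at h
    omega
  obtain ⟨S', h1, h2, h3, h4⟩ := outerA_spec g hPre (List.range gc.length) hrs (gc, 0) S hInv
  rw [hpass]
  refine ⟨S', h1, h2, by simpa using h3, fun h0 => ?_⟩
  obtain ⟨_, _, hall⟩ := h4 (by simpa using h0)
  intro p hp
  obtain ⟨r, c, _, _, _, hpe⟩ := (mem_liveB g p).mp (hInv.2.2.2 p hp)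
  subst hpe
  have hcell : cellA gc r c = "@" := (hInv.1 r c).mpr hp
  obtain ⟨hhr, hhc⟩ := cellA_at_range hcell
  exact hall r (List.mem_range.mpr hhr) c (List.mem_range.mpr hhc) hcell

theorem loopA_spec (g : List (List String)) (hPre : Pre_part_2 g) :
    ∀ n (gc : List (List String)) (S : PySem.Set (Int × Int)) (a : Nat),
      S.length ≤ n → InvA g gc S →
      ∃ F, ReachB S F ∧ closedB F ∧
        loopA gc a = a + (S.length - F.length) := by
  intro n
  induction n with
  | zero =>
    intro gc S a hle hInv
    obtain ⟨S', h1, h2, h3, h4⟩ := passA_spec g hPre gc S hInv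
    have hk : (passA gc).2 = 0 := by omega
    refine ⟨S, ReachB.refl S, h4 hk, ?_⟩
    rw [loopA]
    simp [hk]
  | succ n ih =>
    intro gc S a hle hInv
    obtain ⟨S', h1, h2, h3, h4⟩ := passA_spec g hPre gc S hInv
    by_cases hk : (passA gc).2 = 0
    · refine ⟨S, ReachB.refl S, h4 hk, ?_⟩
      rw [loopA]
      simp [hk]
    · have hlt : S'.length ≤ n := by omega
      obtain ⟨F, f1, f2, f3⟩ := ih (passA gc).1 S' (a + (passA gc).2) hlt h1
      refine ⟨F, ReachB_trans h2 f1, f2, ?_⟩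
      rw [loopA]
      simp only [hk, dite_false]
      rw [f3]
      have hFle : F.length ≤ S'.length :=
        pvNodupSubsetLen (ReachB_nodup f1 h1.2.1) (ReachB_subset f1)
      omega

/- ## B's worklist = a sequence of abstract removals -/

theorem pvMemFoldlAppendIf {α β : Type} (P : α → Prop) [DecidablePred P]
    (f : α → β) (L : List α) (acc : List β) (x : β) :
    (x ∈ L.foldl (fun acc d => if P d then acc ++ [f d] else acc) acc
      ↔ x ∈ acc ∨ ∃ d ∈ L, P d ∧ x = f d) := by
  induction L generalizing acc with
  | nil => simp
  | cons a t ih =>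
    rw [List.foldl_cons, ih]
    by_cases h : P a
    · simp only [h, if_pos, List.mem_append, List.mem_singleton]
      constructor
      · rintro (⟨hx | hx⟩ | ⟨d, hd, hPd, hx⟩)
        · exact Or.inl hx
        · exact Or.inr ⟨a, by simp, h, hx⟩
        · exact Or.inr ⟨d, by simp [hd], hPd, hx⟩
      · rintro (hx | ⟨d, hd, hPd, hx⟩)
        · exact Or.inl (Or.inl hx)
        · rcases List.mem_cons.mp hd with rfl | hd
          · exact Or.inl (Or.inr hx)
          · exact Or.inr ⟨d, hd, hPd, hx⟩
    · simp only [h, if_neg, not_false_iff]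
      constructor
      · rintro (hx | ⟨d, hd, hPd, hx⟩)
        · exact Or.inl hx
        · exact Or.inr ⟨d, by simp [hd], hPd, hx⟩
      · rintro (hx | ⟨d, hd, hPd, hx⟩)
        · exact Or.inl hx
        · rcases List.mem_cons.mp hd with rfl | hd
          · exact absurd hPd h
          · exact Or.inr ⟨d, hd, hPd, hx⟩

theorem mem_appendB (live : PySem.Set (Int × Int)) (r c : Int) (w : Int × Int) :
    w ∈ appendB live r c ↔ ∃ d ∈ offsB, w = (r + d.1, c + d.2) ∧ w ∈ live := by
  unfold appendB
  rw [pvMemFoldlAppendIf (fun d : Int × Int => (r + d.1, c + d.2) ∈ live)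
    (fun d : Int × Int => (r + d.1, c + d.2))]
  simp only [List.not_mem_nil, false_or]
  constructor
  · rintro ⟨d, hd, h1, rfl⟩
    exact ⟨d, hd, rfl, h1⟩
  · rintro ⟨d, hd, rfl, h1⟩
    exact ⟨d, hd, h1, rfl⟩

theorem pvNegOffs {d : Int × Int} (hd : d ∈ offsB) : (-d.1, -d.2) ∈ offsB := by
  simp only [offsB, List.mem_cons, List.not_mem_nil, or_false] at hd ⊢
  rcases hd with rfl | rfl | rfl | rfl | rfl | rfl | rfl | rfl <;> norm_num

theorem loopB_spec (live : PySem.Set (Int × Int))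
    (queue : List (Int × Int)) (removed : Int) (hnd : live.Nodup)
    (hq : ∀ w ∈ live, degB live w.1 w.2 < 4 → w ∈ queue) :
    ∃ F, ReachB live F ∧ closedB F ∧
      loopB live queue removed = removed + (live.length : Int) - (F.length : Int) := by
  induction live, queue, removed using loopB.induct with
  | case1 live removed =>
    refine ⟨live, ReachB.refl live, fun p hp hdeg => ?_, by rw [loopB]; ring⟩
    simpa using hq p hp hdeg
  | case2 live removed v q h lv ih =>
    have hlv : lv = PySem.Set.discard live v := rfl
    rw [hlv] at ih
    set live' := PySem.Set.discard live v with hlive'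
    have hnd' : live'.Nodup := PySem.Set.nodup_discard _ _ hnd
    have hq' : ∀ w ∈ live', degB live' w.1 w.2 < 4 → w ∈ q ++ appendB live' v.1 v.2 := by
      intro w hw hdeg
      have hwl : w ∈ live ∧ w ≠ v := (PySem.Set.mem_discard _ _ _).mp hw
      by_cases hold : degB live w.1 w.2 < 4
      · have := hq w hwl.1 hold
        rcases List.mem_cons.mp this with rfl | hmem
        · exact absurd rfl hwl.2
        · exact List.mem_append.mpr (Or.inl hmem)
      · -- the degree dropped: v is a neighbour of w, so Source B appended w
        refine List.mem_append.mpr (Or.inr ?_)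
        rw [degB_eq_countP] at hdeg hold
        have hlt : offsB.countP (fun d => decide ((w.1 + d.1, w.2 + d.2) ∈ live')) <
            offsB.countP (fun d => decide ((w.1 + d.1, w.2 + d.2) ∈ live)) := by omega
        obtain ⟨d, hd, hP, hnP⟩ := pvCountPExists hlt
        simp only [decide_eq_true_eq] at hP hnP
        have hv : (w.1 + d.1, w.2 + d.2) = v := by
          by_contra hne
          exact hnP ((PySem.Set.mem_discard _ _ _).mpr ⟨hP, hne⟩)
        obtain ⟨hv1, hv2⟩ : v.1 = w.1 + d.1 ∧ v.2 = w.2 + d.2 := by rw [← hv]; exact ⟨rfl, rfl⟩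
        rw [mem_appendB]
        refine ⟨(-d.1, -d.2), pvNegOffs hd, ?_, hw⟩
        rw [Prod.ext_iff]
        constructor <;> simp <;> omega
    obtain ⟨F, hreach, hclosed, heq⟩ := ih hnd' hq'
    refine ⟨F, ReachB.step v h.1 h.2 hreach, hclosed, ?_⟩
    rw [loopB, dif_pos h, heq]
    have hlen := pvLenDiscard hnd h.1
    rw [← hlive'] at hlen
    push_cast
    omega
  | case3 live removed v q h ih =>
    have hq' : ∀ w ∈ live, degB live w.1 w.2 < 4 → w ∈ q := by
      intro w hw hdeg
      rcases List.mem_cons.mp (hq w hw hdeg) with rfl | hmem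
      · exact absurd ⟨hw, hdeg⟩ h
      · exact hmem
    obtain ⟨F, hreach, hclosed, heq⟩ := ih hnd hq'
    exact ⟨F, hreach, hclosed, by rw [loopB, dif_neg h]; exact heq⟩

/- ## Assembly -/

theorem part_2_ports_agree (rows : List (List String)) (hPre : Pre_part_2 rows) :
    part_2 rows = part_2_alt rows := by
  have hInv0 : InvA rows rows (liveB rows) := by
    refine ⟨?_, liveB_nodup rows, ⟨rfl, fun r => rfl⟩, fun p hp => hp⟩
    intro r c
    constructor
    · intro hcell
      obtain ⟨hr, hc⟩ := cellA_at_range hcell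
      exact (mem_liveB rows _).mpr ⟨r, c, hr, hc, hcell, rfl⟩
    · intro hm
      obtain ⟨r', c', hr', hc', hat, heq⟩ := (mem_liveB rows _).mp hm
      rw [Prod.mk.injEq] at heq
      obtain ⟨h1, h2⟩ : r = r' ∧ c = c' := by omega
      subst h1; subst h2
      exact hat
  obtain ⟨F, hreach, hclosed, heq⟩ :=
    loopA_spec rows hPre (liveB rows).length rows (liveB rows) 0 le_rfl hInv0
  have hq0 : ∀ w ∈ liveB rows, degB (liveB rows) w.1 w.2 < 4 →
      w ∈ (PySem.List.sorted2 (liveB rows) (fun v => v.1) (fun v => v.2)).filter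
        (fun v => degB (liveB rows) v.1 v.2 < 4) := by
    intro w hw hdeg
    rw [List.mem_filter]
    exact ⟨(PySem.List.sorted2_perm _ _ _ _).mem_iff.mpr hw, by simpa using hdeg⟩
  obtain ⟨F', hreach', hclosed', heq'⟩ :=
    loopB_spec (liveB rows) _ 0 (liveB_nodup rows) hq0
  have hFeq : F.length = F'.length :=
    pvFinalLenEq (liveB_nodup rows) hreach hclosed hreach' hclosed'
  have hFle : F.length ≤ (liveB rows).length :=
    pvNodupSubsetLen (ReachB_nodup hreach (liveB_nodup rows)) (ReachB_subset hreach)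
  have hB : part_2_alt rows
      = loopB (liveB rows)
          ((PySem.List.sorted2 (liveB rows) (fun v => v.1) (fun v => v.2)).filter
            (fun v => degB (liveB rows) v.1 v.2 < 4)) 0 := rfl
  rw [hB, heq']
  show ((loopA rows 0 : Nat) : Int) = _
  rw [heq]
  push_cast
  omega

-- ===== VERDICT (by name: the statement is the Claim_ definition above) =====
theorem part_2_spec : Claim_equal_part_2 := by
  intro rows _ hPre
  unfold Spec_part_2
  exact part_2_ports_agree rows hPre
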